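-- pv_equiv track=rewrite | github.com/ioriiroi/research_image | classification/lib/SetLabel.py | set_label
-- ===== SOURCE A (Python) =====
-- def split_label(bookmark):
--     if bookmark < 3:
--         return 0
--     elif 3 <= bookmark < 20:
--         return 1
--     elif 20 <= bookmark < 150:
--         return 2
--     else:
--         return 3
--
-- def set_label(data):
--     all_image_labels = []
--     tmp = [0] * 4
--     for num in data:
--         bookmark = data[num]['bookmark']
--         label = split_label(bookmark)
--         tmp[label] += 1
--         all_image_labels.append(label)
--     return all_image_labels
-- ===== SOURCE B (Python) =====
-- THRESHOLDS = (3, 20, 150)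
--
-- def set_label(data):
--     return [sum(t <= d['bookmark'] for t in THRESHOLDS) for d in data.values()]
-- ===== Notes on version B (the rewrite author's own statement) =====
-- stated objective: idiomatic
-- what changed: Replaces the if/elif comparison cascade and the dead tmp counter list with a threshold table: each label is the number of thresholds in (3, 20, 150) that the bookmark count reaches, computed in one comprehension over the dict values.
import Mathlib
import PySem

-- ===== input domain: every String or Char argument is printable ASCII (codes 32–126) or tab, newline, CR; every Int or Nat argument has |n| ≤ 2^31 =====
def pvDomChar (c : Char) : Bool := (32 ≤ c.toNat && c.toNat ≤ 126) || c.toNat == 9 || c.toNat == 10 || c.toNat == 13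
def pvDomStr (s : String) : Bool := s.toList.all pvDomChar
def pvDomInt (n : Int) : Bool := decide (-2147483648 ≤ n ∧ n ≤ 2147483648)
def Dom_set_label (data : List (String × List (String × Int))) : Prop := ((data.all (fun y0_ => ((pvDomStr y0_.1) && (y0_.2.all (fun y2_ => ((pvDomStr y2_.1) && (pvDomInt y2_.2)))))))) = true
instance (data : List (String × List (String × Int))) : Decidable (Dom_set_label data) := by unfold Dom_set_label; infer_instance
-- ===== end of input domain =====

-- B replaces the if/elif cascade and the dead tmp counter with a threshold table:
-- the label is the number of thresholds (3, 20, 150) the bookmark count reaches. (idiomatic; no speed claim)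

-- ===== PORT A =====
def split_label (bookmark : Int) : Int :=
  if bookmark < 3 then 0
  else if 3 ≤ bookmark ∧ bookmark < 20 then 1
  else if 20 ≤ bookmark ∧ bookmark < 150 then 2
  else 3

-- 'for num in data: bookmark = data[num]["bookmark"]; tmp[label] += 1; append(label)'
-- dict lookups are first-match on the association list; Pre_ guarantees the keys are
-- unique and 'bookmark' is present (Python raises KeyError otherwise, so the .getD
-- defaults are unreachable under Pre_). tmp[label] += 1 is always in range (label ∈ 0..3).
def set_label_step (data : List (String × List (String × Int)))
    (st : List Int × List Int) (entry : String × List (String × Int)) :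
    List Int × List Int :=
  let num := entry.1
  let bookmark := (PySem.Dict.mk ((PySem.Dict.mk data).getD num [])).getD "bookmark" 0
  let label := split_label bookmark
  (st.1.set label.toNat ((st.1.getD label.toNat 0) + 1), st.2 ++ [label])

def set_label (data : List (String × List (String × Int))) : List Int :=
  (data.foldl (set_label_step data) ([0, 0, 0, 0], [])).2

-- ===== PORT B =====
def pvThresholds : List Int := [3, 20, 150]

-- '[sum(t <= d["bookmark"] for t in THRESHOLDS) for d in data.values()]'
-- (same lookup convention as above; .getD default unreachable under Pre_)
def set_label_alt (data : List (String × List (String × Int))) : List Int :=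
  data.map (fun p =>
    let b := (PySem.Dict.mk p.2).getD "bookmark" 0
    pvThresholds.foldl (fun acc t => acc + (if t ≤ b then 1 else 0)) 0)

-- ===== PRECONDITION & SPEC =====
-- Pre_ excludes (i) inner dicts missing the key 'bookmark', on which A raises KeyError,
-- and (ii) association lists with duplicate keys, which no Python dict can present
-- (duplicates collapse in a dict, so neither first- nor last-match order is specified there).
def Pre_set_label (data : List (String × List (String × Int))) : Prop :=
  (data.map Prod.fst).Nodup ∧
  ∀ p ∈ data, (p.2.map Prod.fst).Nodup ∧ "bookmark" ∈ p.2.map Prod.fst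
instance (data : List (String × List (String × Int))) : Decidable (Pre_set_label data) := by unfold Pre_set_label; infer_instance

def pvWitness_set_label : (List (String × List (String × Int))) := [("a", [("bookmark", 5)])]

def Spec_set_label (data : List (String × List (String × Int))) (out : List Int) : Prop := out = set_label_alt data
instance (data : List (String × List (String × Int))) (out : List Int) : Decidable (Spec_set_label data out) := by unfold Spec_set_label; infer_instance

-- ===== CLAIM (what is proved, stated in full; the proofs are below) =====
def Claim_equal_set_label : Prop := ∀ (data : List (String × List (String × Int))), Dom_set_label data → Pre_set_label data → Spec_set_label data (set_label data)

-- ===== LEMMAS AND PROOFS =====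

-- the if/elif cascade equals the threshold count, pointwise
theorem split_label_eq_count (b : Int) :
    split_label b = pvThresholds.foldl (fun acc t => acc + (if t ≤ b then 1 else 0)) 0 := by
  simp only [split_label, pvThresholds, List.foldl]
  split_ifs <;> omega

-- first-match lookup on a nodup association list finds the paired value
theorem dict_get?_of_mem_nodup {ν : Type} (l : List (String × ν)) (k : String) (v : ν)
    (hnd : (l.map Prod.fst).Nodup) (hmem : (k, v) ∈ l) :
    (PySem.Dict.mk l).get? k = some v := by
  induction l with
  | nil => cases hmem
  | cons hd tl ih =>
    obtain ⟨k', v'⟩ := hd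
    simp only [List.map_cons, List.nodup_cons] at hnd
    rcases List.mem_cons.mp hmem with h | h
    · rw [PySem.Dict.get?_mk_cons]
      simp [Prod.mk.injEq] at h
      simp [h.1, h.2]
    · have hne : k' ≠ k := by
        intro he
        exact hnd.1 (he ▸ (List.mem_map.mpr ⟨(k, v), h, rfl⟩))
      rw [PySem.Dict.get?_mk_cons]
      simp only [beq_iff_eq, if_neg hne]
      exact ih hnd.2 h

-- A's fold: the second component only appends, so it is the map of the per-entry label
theorem foldl_snd_eq_map (data l : List (String × List (String × Int))) (t0 a0 : List Int) :
    (l.foldl (set_label_step data) (t0, a0)).2 =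
      a0 ++ l.map (fun entry => split_label
        ((PySem.Dict.mk ((PySem.Dict.mk data).getD entry.1 [])).getD "bookmark" 0)) := by
  induction l generalizing t0 a0 with
  | nil => simp
  | cons hd tl ih => simp [set_label_step, ih]

-- ===== VERDICT (by name: the statement is the Claim_ definition above) =====
theorem set_label_spec : Claim_equal_set_label := by
  intro data _hdom hpre
  obtain ⟨hnd, hinner⟩ := hpre
  show set_label data = set_label_alt data
  unfold set_label set_label_alt
  rw [foldl_snd_eq_map data data]
  simp only [List.nil_append]
  apply List.map_congr_left
  intro p hp
  have houter : (PySem.Dict.mk data).getD p.1 [] = p.2 := by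
    have := dict_get?_of_mem_nodup data p.1 p.2 hnd (by simpa using hp)
    simp [PySem.Dict.getD, this]
  rw [houter, split_label_eq_count]
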